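-- pv_equiv track=rewrite | github.com/ProgMann228/algorithms_laba2-jpeg- | py_files/AC_DC.py | DC_coding
-- ===== SOURCE A (Python) =====
-- def DC_coding(list):
--     coded=[]
--     for a in list:
--         if a == 0:
--             size = 0
--             value = ''
--         else:
--             size = len(bin(abs(a))) - 2 #-2 потому что 0b в начале#value
--             if a>0:
--                 value = bin(a)[2:]
--             else:
--                 # инвертируем строку битов от abs(a)
--                 bits = bin(abs(a))[2:].zfill(size)  # дополняем до size
--                 value = ''.join('1' if b == '0' else '0' for b in bits)
--         coded.append((size, value))
--
--     return coded
-- ===== SOURCE B (Python) =====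
-- def _enc(a):
--     if a == 0:
--         return (0, '')
--     size = a.bit_length()
--     if a > 0:
--         return (size, bin(a)[2:])
--     # one's complement closed form: invert the bits of abs(a) arithmetically
--     return (size, format((1 << size) - 1 + a, f'0{size}b'))
--
--
-- def DC_coding(list):
--     return [_enc(a) for a in list]
-- ===== Notes on version B (the rewrite author's own statement) =====
-- stated objective: faster
-- what changed: The negative branch's character-by-character bit-inversion loop (plus zfill) is replaced by the arithmetic one's complement (1 << size) - 1 + a formatted at fixed width, and the append loop becomes a per-element helper with a comprehension.
import Mathlib
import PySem

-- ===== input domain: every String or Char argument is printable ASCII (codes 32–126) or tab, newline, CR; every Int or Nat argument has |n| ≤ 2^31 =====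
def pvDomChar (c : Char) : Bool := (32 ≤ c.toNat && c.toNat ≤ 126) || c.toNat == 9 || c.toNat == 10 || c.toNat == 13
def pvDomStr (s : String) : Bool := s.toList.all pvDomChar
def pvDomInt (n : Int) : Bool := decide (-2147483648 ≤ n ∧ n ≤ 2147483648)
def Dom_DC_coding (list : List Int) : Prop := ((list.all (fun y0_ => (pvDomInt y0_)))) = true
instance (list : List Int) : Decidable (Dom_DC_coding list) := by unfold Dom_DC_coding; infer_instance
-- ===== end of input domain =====

-- B replaces A's per-character bit-inversion loop by the arithmetic one's complement at fixed width (idiomatic; return value only).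

-- ===== PORT A =====
-- bin(n)[2:] for a natural number: most-significant bit first ([] for 0; A only calls it on n ≥ 1)
def pvBinChars (n : Nat) : List Char :=
  if _h : n = 0 then []
  else pvBinChars (n / 2) ++ [if n % 2 = 1 then '1' else '0']
decreasing_by omega

-- literal port of A: loop with append; size = len(bin(abs(a))) - 2; zfill; per-char inversion
def DC_coding (list : List Int) : List (Int × String) :=
  list.foldl
    (fun coded a =>
      coded ++
        [if a = 0 then ((0 : Int), "")
         else
           let size : Nat := (['0', 'b'] ++ pvBinChars a.natAbs).length - 2
           if a > 0 then ((size : Int), String.ofList (pvBinChars a.natAbs))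
           else
             let bits := List.replicate (size - (pvBinChars a.natAbs).length) '0' ++ pvBinChars a.natAbs
             ((size : Int), String.ofList (bits.map (fun b => if b = '0' then '1' else '0')))])
    []

-- ===== PORT B =====
-- format(m, f'0{w}b'): w binary digits of m, MSB first (exact for m < 2^w, the only case B reaches)
def pvBinW : Nat → Nat → List Char
  | 0, _ => []
  | w + 1, m => pvBinW w (m / 2) ++ [if m % 2 = 1 then '1' else '0']

def pvEncB (a : Int) : Int × String :=
  if a = 0 then ((0 : Int), "")
  else
    let size := PySem.Int.bitLength a
    if a > 0 then ((size : Int), String.ofList (pvBinChars a.natAbs))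
    else ((size : Int), String.ofList (pvBinW size (((1 : Int) <<< size - 1 + a).toNat)))

def DC_coding_alt (list : List Int) : List (Int × String) :=
  list.map pvEncB

-- ===== PRECONDITION & SPEC =====
def Spec_DC_coding (list : List Int) (out : List (Int × String)) : Prop := out = DC_coding_alt list
instance (list : List Int) (out : List (Int × String)) : Decidable (Spec_DC_coding list out) := by unfold Spec_DC_coding; infer_instance

-- ===== CLAIM (what is proved, stated in full; the proofs are below) =====
def Claim_equal_DC_coding : Prop := ∀ (list : List Int), Dom_DC_coding list → Spec_DC_coding list (DC_coding list)

-- ===== LEMMAS AND PROOFS =====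

lemma pvBinChars_len : ∀ n : Nat, (pvBinChars n).length = PySem.Int.bitLength (n : Int) := by
  intro n
  induction n using Nat.strong_induction_on with
  | _ n ih =>
    rw [pvBinChars]
    by_cases h : n = 0
    · simp [h]
    · simp only [h, dif_neg, not_false_iff, List.length_append, List.length_singleton]
      rw [ih (n / 2) (by omega), PySem.Int.bitLength_natCast (m := n) (by omega)]

lemma pvBinW_eq_binChars : ∀ n : Nat, pvBinW (pvBinChars n).length n = pvBinChars n := by
  intro n
  induction n using Nat.strong_induction_on with
  | _ n ih =>
    by_cases h : n = 0
    · subst h; rw [pvBinChars]; simp [pvBinW]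
    · rw [pvBinChars]
      simp only [h, dif_neg, not_false_iff, List.length_append, List.length_singleton]
      rw [pvBinW, ih (n / 2) (by omega)]

lemma pvBinW_compl : ∀ (w m : Nat), m < 2 ^ w →
    pvBinW w (2 ^ w - 1 - m) = (pvBinW w m).map (fun b => if b = '0' then '1' else '0') := by
  intro w
  induction w with
  | zero => intro m _; rfl
  | succ w ih =>
    intro m hm
    have hP : 2 ^ (w + 1) = 2 * 2 ^ w := by ring
    have h2 : (2 ^ (w + 1) - 1 - m) / 2 = 2 ^ w - 1 - m / 2 := by omega
    have h3 : (2 ^ (w + 1) - 1 - m) % 2 = 1 - m % 2 := by omega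
    rw [pvBinW, pvBinW, h2, h3, ih (m / 2) (by omega), List.map_append]
    rcases Nat.mod_two_eq_zero_or_one m with h | h <;> simp [h]

lemma pvEnc_eq (a : Int) :
    (if a = 0 then ((0 : Int), "")
     else
       let size : Nat := (['0', 'b'] ++ pvBinChars a.natAbs).length - 2
       if a > 0 then ((size : Int), String.ofList (pvBinChars a.natAbs))
       else
         let bits := List.replicate (size - (pvBinChars a.natAbs).length) '0' ++ pvBinChars a.natAbs
         ((size : Int), String.ofList (bits.map (fun b => if b = '0' then '1' else '0'))))
    = pvEncB a := by
  by_cases h0 : a = 0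
  · simp [h0, pvEncB]
  · have hbl : PySem.Int.bitLength a = (pvBinChars a.natAbs).length := by
      rw [pvBinChars_len]
      rcases le_or_gt 0 a with h | h
      · congr 1; omega
      · rw [show ((a.natAbs : Nat) : Int) = -a from by omega, PySem.Int.bitLength_neg]
    have hsize : (['0', 'b'] ++ pvBinChars a.natAbs).length - 2 = (pvBinChars a.natAbs).length := by
      simp
    by_cases hp : a > 0
    · simp only [pvEncB, h0, hp, if_true, if_false, hsize, hbl]
    · simp only [pvEncB, h0, hp, if_false, hsize, hbl]
      simp only [Nat.sub_self, List.replicate_zero, List.nil_append]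
      have hlt : a.natAbs < 2 ^ (pvBinChars a.natAbs).length := by
        have := PySem.Int.lt_two_pow_bitLength a
        rwa [hbl] at this
      have harg : ((1 : Int) <<< (pvBinChars a.natAbs).length - 1 + a).toNat
          = 2 ^ (pvBinChars a.natAbs).length - 1 - a.natAbs := by
        have hsh : (1 : Int) <<< (pvBinChars a.natAbs).length
            = 2 ^ (pvBinChars a.natAbs).length := by
          simp [Int.shiftLeft_eq]
        have hc : ((2 ^ (pvBinChars a.natAbs).length : Nat) : Int)
            = 2 ^ (pvBinChars a.natAbs).length := by push_cast; ring
        omega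
      rw [harg, pvBinW_compl _ a.natAbs hlt, pvBinW_eq_binChars a.natAbs]

-- ===== VERDICT (by name: the statement is the Claim_ definition above) =====
theorem DC_coding_spec : Claim_equal_DC_coding := by
  intro list _
  show DC_coding list = DC_coding_alt list
  unfold DC_coding DC_coding_alt
  rw [PySem.List.foldl_append_singleton_eq_map]
  simp only [List.nil_append]
  exact List.map_congr_left (fun a _ => pvEnc_eq a)
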